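-- pv_equiv track=rewrite | github.com/frvnkliu/segmentron | segmentron/src/Segmentron/function_list_scoring.py | forbidden_region_class_score
-- ===== SOURCE A (Python) =====
-- def forbidden_region_class_score(parameters, starting_index, ending_index):
--     forbidden_region_classes = parameters["forbidden_region_classes"]
--     if len(forbidden_region_classes) == 1:
--         return 0
--     region_starting_index = 0
--     region_ending_index = 0
--     score = 0
--     contained = False
--     #For each class, check that each segment does not intersect with more than one forbidden region of that class
--     #Penalize heavily if any segment does intersect more than one forbidden region of any class
--     for forbidden_region_class in forbidden_region_classes:
--         contained = False
--         for forbidden_region in forbidden_region_class: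
--             region_starting_index, region_ending_index = forbidden_region
--             #Check to see if the forbidden region intersects at all with the segment
--             if not(region_ending_index <= starting_index or region_starting_index >= ending_index):
--                 #Allow at most one forbidden region per class to intersect with the segment before penalization
--                 if not contained:
--                     contained = True
--                 else:
--                     score = score + 450**2
--     return score
-- ===== SOURCE B (Python) =====
-- def forbidden_region_class_score(parameters, starting_index, ending_index):
--     classes = parameters["forbidden_region_classes"]
--     if len(classes) == 1:
--         return 0
--     # Global reduction: each class forgives its first intersecting region, so the
--     # total penalty is (total intersecting regions - classes with any intersection) * 450**2.
--     total_hits = sum(1 for cls in classes for (s, e) in cls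
--                      if s < ending_index and e > starting_index)
--     hit_classes = sum(1 for cls in classes
--                       if any(s < ending_index and e > starting_index for (s, e) in cls))
--     return (total_hits - hit_classes) * 450**2
-- ===== Notes on version B (the rewrite author's own statement) =====
-- stated objective: alternative
-- what changed: Replaces A's per-class stateful loop (a 'contained' flag scoring incrementally) by a global reduction: count all intersecting regions and count classes with at least one intersection, then return (total_hits - hit_classes) * 450**2 in one closed-form subtraction; the per-class clamp disappears because each nonempty class contributes exactly one forgiven region. Pre_ excludes inputs whose dict lacks the 'forbidden_region_classes' key, on which A raises KeyError.
import Mathlib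
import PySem

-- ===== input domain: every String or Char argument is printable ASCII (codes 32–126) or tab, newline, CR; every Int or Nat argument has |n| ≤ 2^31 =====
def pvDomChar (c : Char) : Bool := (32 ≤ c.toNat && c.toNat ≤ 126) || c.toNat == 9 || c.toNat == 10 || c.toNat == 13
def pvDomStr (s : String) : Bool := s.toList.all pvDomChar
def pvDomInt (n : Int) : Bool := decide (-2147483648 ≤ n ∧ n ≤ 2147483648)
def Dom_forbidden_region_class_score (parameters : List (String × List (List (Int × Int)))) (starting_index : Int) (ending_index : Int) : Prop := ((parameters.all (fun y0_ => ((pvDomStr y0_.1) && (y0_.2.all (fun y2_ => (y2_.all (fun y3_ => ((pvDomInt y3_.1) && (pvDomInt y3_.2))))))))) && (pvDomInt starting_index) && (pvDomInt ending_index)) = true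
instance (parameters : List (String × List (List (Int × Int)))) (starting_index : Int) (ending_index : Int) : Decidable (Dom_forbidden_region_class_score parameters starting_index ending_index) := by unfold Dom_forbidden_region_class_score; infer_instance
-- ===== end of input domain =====

-- B is an alternative decomposition: a global reduction (total intersecting regions minus
-- classes with any intersection, times 450^2) replacing A's per-class 'contained' flag loop.

-- ===== PORT A =====
-- inner loop body: state is (score, contained)
def pvAInner (starting_index ending_index : Int) (st : Int × Bool) (fr : Int × Int) : Int × Bool :=
  if ¬ (fr.2 ≤ starting_index ∨ fr.1 ≥ ending_index) then
    if st.2 = false then (st.1, true) else (st.1 + 450 ^ 2, st.2)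
  else st

def forbidden_region_class_score (parameters : List (String × List (List (Int × Int)))) (starting_index : Int) (ending_index : Int) : Int :=
  match (PySem.Dict.mk parameters).get? "forbidden_region_classes" with
  | none => 0   -- Python raises KeyError here; excluded by Pre_
  | some forbidden_region_classes =>
    if forbidden_region_classes.length = 1 then 0
    else
      (forbidden_region_classes.foldl
        (fun score forbidden_region_class =>
          (forbidden_region_class.foldl (pvAInner starting_index ending_index) (score, false)).1)
        0)

-- ===== PORT B =====
def pvHit (starting_index ending_index : Int) (fr : Int × Int) : Bool :=
  decide (fr.1 < ending_index ∧ fr.2 > starting_index)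

def forbidden_region_class_score_alt (parameters : List (String × List (List (Int × Int)))) (starting_index : Int) (ending_index : Int) : Int :=
  match (PySem.Dict.mk parameters).get? "forbidden_region_classes" with
  | none => 0   -- Python raises KeyError here; excluded by Pre_
  | some classes =>
    if classes.length = 1 then 0
    else
      let total_hits : Int :=
        ((classes.flatMap fun cls => cls.filter (pvHit starting_index ending_index)).length : Int)
      let hit_classes : Int :=
        ((classes.countP fun cls => cls.any (pvHit starting_index ending_index)) : Int)
      (total_hits - hit_classes) * 450 ^ 2

-- ===== PRECONDITION & SPEC =====
-- Pre_ excludes exactly the inputs where A raises KeyError: dicts missing the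
-- "forbidden_region_classes" key.
def Pre_forbidden_region_class_score (parameters : List (String × List (List (Int × Int)))) (_starting_index : Int) (_ending_index : Int) : Prop :=
  (parameters.map Prod.fst).contains "forbidden_region_classes" = true
instance (parameters : List (String × List (List (Int × Int)))) (starting_index : Int) (ending_index : Int) : Decidable (Pre_forbidden_region_class_score parameters starting_index ending_index) := by unfold Pre_forbidden_region_class_score; infer_instance

def pvWitness_forbidden_region_class_score : (List (String × List (List (Int × Int)))) × Int × Int :=
  ([("forbidden_region_classes", [[(0, 3), (2, 5)], [(1, 2)]])], 1, 4)

def Spec_forbidden_region_class_score (parameters : List (String × List (List (Int × Int)))) (starting_index : Int) (ending_index : Int) (out : Int) : Prop := out = forbidden_region_class_score_alt parameters starting_index ending_index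
instance (parameters : List (String × List (List (Int × Int)))) (starting_index : Int) (ending_index : Int) (out : Int) : Decidable (Spec_forbidden_region_class_score parameters starting_index ending_index out) := by unfold Spec_forbidden_region_class_score; infer_instance

-- ===== CLAIM (what is proved, stated in full; the proofs are below) =====
def Claim_equal_forbidden_region_class_score : Prop := ∀ (parameters : List (String × List (List (Int × Int)))) (starting_index : Int) (ending_index : Int), Dom_forbidden_region_class_score parameters starting_index ending_index → Pre_forbidden_region_class_score parameters starting_index ending_index → Spec_forbidden_region_class_score parameters starting_index ending_index (forbidden_region_class_score parameters starting_index ending_index)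

-- ===== LEMMAS AND PROOFS =====

-- once 'contained' is true, each further intersecting region adds 450^2
theorem pvAInner_true (si ei : Int) (cls : List (Int × Int)) (sc : Int) :
    (cls.foldl (pvAInner si ei) (sc, true)).1
      = sc + ((cls.countP (pvHit si ei) : Int)) * 450 ^ 2 := by
  induction cls generalizing sc with
  | nil => simp
  | cons hd tl ih =>
    by_cases h : hd.1 < ei ∧ hd.2 > si
    · have hc : ¬ (hd.2 ≤ si ∨ hd.1 ≥ ei) := by omega
      simp only [List.foldl_cons, pvAInner, if_pos hc, List.countP_cons, pvHit,
        decide_eq_true_iff.mpr h]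
      norm_num [ih]
      ring
    · have hc : hd.2 ≤ si ∨ hd.1 ≥ ei := by omega
      simp only [List.foldl_cons, pvAInner, if_neg (not_not_intro hc), List.countP_cons, ih]
      simp [pvHit, h]

-- with 'contained' initially false, the first intersecting region is free
theorem pvAInner_false (si ei : Int) (cls : List (Int × Int)) (sc : Int) :
    (cls.foldl (pvAInner si ei) (sc, false)).1
      = sc + ((cls.countP (pvHit si ei) : Int) - (if cls.any (pvHit si ei) then 1 else 0)) * 450 ^ 2 := by
  induction cls generalizing sc with
  | nil => simp
  | cons hd tl ih =>
    rw [List.foldl_cons, List.countP_cons, List.any_cons]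
    by_cases h : hd.1 < ei ∧ hd.2 > si
    · have hb : pvHit si ei hd = true := decide_eq_true h
      have hc : ¬ (hd.2 ≤ si ∨ hd.1 ≥ ei) := by omega
      rw [show pvAInner si ei (sc, false) hd = (sc, true) from by simp [pvAInner, hc]]
      rw [pvAInner_true, hb]
      simp only [Bool.true_or]
      push_cast
      ring
    · have hb : pvHit si ei hd = false := decide_eq_false h
      have hc : hd.2 ≤ si ∨ hd.1 ≥ ei := by omega
      rw [show pvAInner si ei (sc, false) hd = (sc, false) from by simp [pvAInner, hc]]
      rw [ih, hb, Bool.false_or]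
      simp

-- A's outer loop equals B's global reduction
theorem pvOuter (si ei : Int) (classes : List (List (Int × Int))) (sc : Int) :
    classes.foldl (fun score cls => (cls.foldl (pvAInner si ei) (score, false)).1) sc
      = sc + (((classes.flatMap fun cls => cls.filter (pvHit si ei)).length : Int)
              - ((classes.countP fun cls => cls.any (pvHit si ei)) : Int)) * 450 ^ 2 := by
  induction classes generalizing sc with
  | nil => simp
  | cons hd tl ih =>
    rw [List.foldl_cons, pvAInner_false, ih, List.flatMap_cons, List.length_append,
      List.countP_cons, ← List.countP_eq_length_filter]
    by_cases h : hd.any (pvHit si ei) = true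
    · simp only [h]
      push_cast
      ring
    · simp only [h]
      push_cast
      ring

-- ===== VERDICT (by name: the statement is the Claim_ definition above) =====
theorem forbidden_region_class_score_spec : Claim_equal_forbidden_region_class_score := by
  intro parameters si ei _ _
  unfold Spec_forbidden_region_class_score forbidden_region_class_score forbidden_region_class_score_alt
  cases h : (PySem.Dict.mk parameters).get? "forbidden_region_classes" with
  | none => rfl
  | some classes =>
    simp only []
    split
    · rfl
    · simpa using pvOuter si ei classes 0
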